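-- pv_equiv track=rewrite | github.com/zhengxueqian01/Edit-Verify-Reason | src/chart_agent/core/vision_tool_phase.py | _color_aliases
-- ===== SOURCE A (Python) =====
-- def _color_aliases(color: str) -> set[str]:
--     token = str(color or "").strip().lower()
--     aliases = {token} if token else set()
--     canonical = {
--         "red": {"#ff0000", "#d62728", "#e41a1c", "#ff3b30"},
--         "blue": {"#0000ff", "#1f77b4", "#4c78a8", "#007aff"},
--         "green": {"#008000", "#2ca02c", "#4daf4a", "#34c759"},
--         "orange": {"#ff7f0e", "#ff9500", "#ffa500"},
--         "purple": {"#9467bd", "#800080", "#af52de"},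
--         "pink": {"#ff1493", "#e377c2"},
--         "yellow": {"#bcbd22", "#ffff00", "#ffd60a"},
--         "cyan": {"#17becf", "#00ffff"},
--         "gray": {"#7f7f7f", "#808080"},
--         "black": {"#000000"},
--     }
--     for name, values in canonical.items():
--         if token == name or token in values:
--             aliases.add(name)
--             aliases.update(values)
--     return aliases
-- ===== SOURCE B (Python) =====
-- _CANONICAL = {
--     "red": {"#ff0000", "#d62728", "#e41a1c", "#ff3b30"},
--     "blue": {"#0000ff", "#1f77b4", "#4c78a8", "#007aff"},
--     "green": {"#008000", "#2ca02c", "#4daf4a", "#34c759"},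
--     "orange": {"#ff7f0e", "#ff9500", "#ffa500"},
--     "purple": {"#9467bd", "#800080", "#af52de"},
--     "pink": {"#ff1493", "#e377c2"},
--     "yellow": {"#bcbd22", "#ffff00", "#ffd60a"},
--     "cyan": {"#17becf", "#00ffff"},
--     "gray": {"#7f7f7f", "#808080"},
--     "black": {"#000000"},
-- }
--
-- # Reverse index built once: every canonical name and every hex value maps to its
-- # full alias group {name} | values.
-- _REVERSE = {
--     key: {name} | values
--     for name, values in _CANONICAL.items()
--     for key in {name} | values
-- }
--
--
-- def _color_aliases(color: str) -> set[str]: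
--     token = str(color or "").strip().lower()
--     group = _REVERSE.get(token)
--     if group is not None:
--         return {token} | group
--     return {token} if token else set()
-- ===== Notes on version B (the rewrite author's own statement) =====
-- stated objective: simpler
-- what changed: Replaces the per-call scan over all canonical entries (with membership tests in each value set) by a reverse-lookup dict built once at module load, so each call is a single normalized-token lookup.
import Mathlib
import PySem

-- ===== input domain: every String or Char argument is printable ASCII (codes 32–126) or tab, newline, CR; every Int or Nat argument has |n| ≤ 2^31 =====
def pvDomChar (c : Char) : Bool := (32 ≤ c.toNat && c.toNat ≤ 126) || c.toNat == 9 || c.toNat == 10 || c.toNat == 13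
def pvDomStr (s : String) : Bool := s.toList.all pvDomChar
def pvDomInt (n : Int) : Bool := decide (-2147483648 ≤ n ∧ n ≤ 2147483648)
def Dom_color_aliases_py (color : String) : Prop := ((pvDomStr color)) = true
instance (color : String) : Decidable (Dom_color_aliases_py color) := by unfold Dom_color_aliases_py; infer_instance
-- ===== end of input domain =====

set_option maxRecDepth 8000
set_option maxHeartbeats 2000000


-- B replaces A's per-call scan over the canonical table by a reverse-lookup dict
-- built once (every name and hex value -> its alias group); objective: simpler.

-- the canonical alias table (shared data constant; each port traverses it its own way)
def pvCanonical : List (String × List String) :=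
  [("red", ["#ff0000", "#d62728", "#e41a1c", "#ff3b30"]),
   ("blue", ["#0000ff", "#1f77b4", "#4c78a8", "#007aff"]),
   ("green", ["#008000", "#2ca02c", "#4daf4a", "#34c759"]),
   ("orange", ["#ff7f0e", "#ff9500", "#ffa500"]),
   ("purple", ["#9467bd", "#800080", "#af52de"]),
   ("pink", ["#ff1493", "#e377c2"]),
   ("yellow", ["#bcbd22", "#ffff00", "#ffd60a"]),
   ("cyan", ["#17becf", "#00ffff"]),
   ("gray", ["#7f7f7f", "#808080"]),
   ("black", ["#000000"])]

-- ===== PORT A =====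
-- A's loop over the canonical table, on the normalized token
def pvScanA (token : String) : List String :=
  let aliases : PySem.Set String :=
    if token ≠ "" then PySem.Set.ofList [token] else PySem.Set.empty
  pvCanonical.foldl
    (fun acc nv =>
      if token == nv.1 || nv.2.contains token then
        nv.2.foldl PySem.Set.add (PySem.Set.add acc nv.1)
      else acc)
    aliases

def color_aliases_py (color : String) : List String :=
  pvScanA (PySem.Str.lower (PySem.Str.strip color))

-- ===== PORT B =====
-- _REVERSE: every key (name or hex value) -> its full alias group {name} | values
def pvReverse : PySem.Dict String (PySem.Set String) :=
  pvCanonical.foldl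
    (fun d nv =>
      (PySem.Set.union (PySem.Set.ofList [nv.1]) nv.2).foldl
        (fun d' k => d'.insert k (PySem.Set.union (PySem.Set.ofList [nv.1]) nv.2)) d)
    PySem.Dict.empty

-- B's single reverse-index lookup, on the normalized token
def pvLookupB (token : String) : List String :=
  match PySem.Dict.get? pvReverse token with
  | some g => PySem.Set.union (PySem.Set.ofList [token]) g
  | none => if token ≠ "" then PySem.Set.ofList [token] else PySem.Set.empty

def color_aliases_py_alt (color : String) : List String :=
  pvLookupB (PySem.Str.lower (PySem.Str.strip color))

-- ===== PRECONDITION & SPEC =====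
def Spec_color_aliases_py (color : String) (out : List String) : Prop := out = color_aliases_py_alt color
instance (color : String) (out : List String) : Decidable (Spec_color_aliases_py color out) := by unfold Spec_color_aliases_py; infer_instance

-- ===== CLAIM (what is proved, stated in full; the proofs are below) =====
def Claim_equal_color_aliases_py : Prop := ∀ (color : String), Dom_color_aliases_py color → Spec_color_aliases_py color (color_aliases_py color)

-- ===== LEMMAS AND PROOFS =====

-- all 38 keys of the reverse index, in insertion order
def pvAllKeys : List String :=
  ["red", "#ff0000", "#d62728", "#e41a1c", "#ff3b30", "blue", "#0000ff", "#1f77b4",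
   "#4c78a8", "#007aff", "green", "#008000", "#2ca02c", "#4daf4a", "#34c759", "orange",
   "#ff7f0e", "#ff9500", "#ffa500", "purple", "#9467bd", "#800080", "#af52de", "pink",
   "#ff1493", "#e377c2", "yellow", "#bcbd22", "#ffff00", "#ffd60a", "cyan", "#17becf",
   "#00ffff", "gray", "#7f7f7f", "#808080", "black", "#000000"]

lemma pvReverse_keys : pvReverse.keys = pvAllKeys := by decide

lemma pvKeyHit : ∀ t ∈ pvAllKeys, pvScanA t = pvLookupB t := by decide

lemma pvKeyLemma (t : String) : pvScanA t = pvLookupB t := by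
  by_cases hmem : t ∈ pvAllKeys
  · exact pvKeyHit t hmem
  · have hget : PySem.Dict.get? pvReverse t = none := by
      rw [PySem.Dict.get?_eq_none_iff_not_mem_keys, pvReverse_keys]
      exact hmem
    unfold pvScanA pvLookupB
    rw [hget]
    simp only [pvAllKeys, List.mem_cons, List.not_mem_nil, not_or, or_false] at hmem
    simp [pvCanonical, hmem]

-- ===== VERDICT (by name: the statement is the Claim_ definition above) =====
theorem color_aliases_py_spec : Claim_equal_color_aliases_py := by
  intro color _
  unfold Spec_color_aliases_py color_aliases_py color_aliases_py_alt
  exact pvKeyLemma (PySem.Str.lower (PySem.Str.strip color))
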